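-- pv_equiv track=rewrite | github.com/Roktar/codewars | dumbphone_keypads-uppercase.py | getIdx
-- ===== SOURCE A (Python) =====
-- def getIdx(map, target) :
--     idx = 0
--     for i in range(len(map)) :
--         for k in range(len(map[i][1])) :
--             if target in map[i][1][k] :
--                 idx = i
--                 break
--     return idx
-- ===== SOURCE B (Python) =====
-- def getIdx(map, target):
--     for i in reversed(range(len(map))):
--         if any(target in e for e in map[i][1]):
--             return i
--     return 0
-- ===== Notes on version B (the rewrite author's own statement) =====
-- stated objective: simpler
-- what changed: Reverse scan with early return on the first matching row replaces the full forward scan that keeps overwriting the last matching index; 0 covers both no-match and a match at row 0.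
import Mathlib
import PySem

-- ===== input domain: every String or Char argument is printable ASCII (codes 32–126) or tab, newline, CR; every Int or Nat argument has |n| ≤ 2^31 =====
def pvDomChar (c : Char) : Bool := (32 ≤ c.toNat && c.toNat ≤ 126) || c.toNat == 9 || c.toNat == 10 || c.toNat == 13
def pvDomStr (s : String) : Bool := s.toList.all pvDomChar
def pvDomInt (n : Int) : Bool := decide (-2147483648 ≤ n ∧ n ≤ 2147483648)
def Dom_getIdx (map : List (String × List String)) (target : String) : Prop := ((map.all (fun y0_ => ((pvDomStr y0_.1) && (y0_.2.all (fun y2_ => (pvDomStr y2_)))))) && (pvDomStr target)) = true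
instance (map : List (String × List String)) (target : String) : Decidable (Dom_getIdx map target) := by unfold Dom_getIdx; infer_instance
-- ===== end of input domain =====

-- B replaces A's forward scan that keeps the last matching row index by a reverse scan
-- returning the first matching row index (simpler: early exit, no accumulator).


-- ===== PORT A =====
-- inner 'for k … : if target in row[k] : idx = i; break' — stops at the first
-- element containing target (PySem.Str.isIn = Python's 'in' on strings, exact)
def getIdxInner (target : String) : List String → Bool
  | [] => false
  | s :: rest => if PySem.Str.isIn target s then true else getIdxInner target rest

def getIdx (map : List (String × List String)) (target : String) : Int :=
  (PySem.List.enumerate map).foldl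
    (fun idx p => if getIdxInner target p.2.2 then p.1 else idx) 0

-- ===== PORT B =====
-- 'for i in reversed(range(len(map))) : if any(target in e for e in map[i][1]) : return i' / 'return 0'
def getIdxRev (target : String) : List (Int × (String × List String)) → Int
  | [] => 0
  | p :: rest => if p.2.2.any (fun e => PySem.Str.isIn target e) then p.1 else getIdxRev target rest

def getIdx_alt (map : List (String × List String)) (target : String) : Int :=
  getIdxRev target (PySem.List.enumerate map).reverse

-- ===== PRECONDITION & SPEC =====
def Spec_getIdx (map : List (String × List String)) (target : String) (out : Int) : Prop := out = getIdx_alt map target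
instance (map : List (String × List String)) (target : String) (out : Int) : Decidable (Spec_getIdx map target out) := by unfold Spec_getIdx; infer_instance

-- ===== CLAIM (what is proved, stated in full; the proofs are below) =====
def Claim_equal_getIdx : Prop := ∀ (map : List (String × List String)) (target : String), Dom_getIdx map target → Spec_getIdx map target (getIdx map target)

-- ===== LEMMAS AND PROOFS =====
theorem getIdxInner_eq_any (target : String) (l : List String) :
    getIdxInner target l = l.any (fun e => PySem.Str.isIn target e) := by
  induction l with
  | nil => rfl
  | cons s rest ih =>
      rw [getIdxInner, List.any_cons, ih]
      cases h : PySem.Str.isIn target s <;> simp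

theorem getIdxRev_of_no_match (target : String) (l : List (Int × (String × List String)))
    (h : l.any (fun p => p.2.2.any (fun e => PySem.Str.isIn target e)) = false) :
    getIdxRev target l = 0 := by
  induction l with
  | nil => rfl
  | cons p rest ih =>
      rw [List.any_cons, Bool.or_eq_false_iff] at h
      rw [getIdxRev, h.1, if_neg (by simp)]
      exact ih h.2

theorem foldl_last_eq_rev_first (target : String) (l : List (Int × (String × List String))) (a : Int) :
    l.foldl (fun idx p => if getIdxInner target p.2.2 then p.1 else idx) a
      = (if l.any (fun p => p.2.2.any (fun e => PySem.Str.isIn target e)) then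
           getIdxRev target l.reverse
         else a) := by
  induction l using List.reverseRecOn generalizing a with
  | nil => simp
  | append_singleton t q ih =>
      rw [List.foldl_append, List.reverse_append, List.any_append]
      simp only [List.foldl_cons, List.foldl_nil, List.reverse_cons, List.reverse_nil,
        List.nil_append, List.cons_append, List.any_cons, List.any_nil, Bool.or_false]
      rw [getIdxInner_eq_any, getIdxRev, ih]
      cases hq : q.2.2.any (fun e => PySem.Str.isIn target e) with
      | true => simp
      | false =>
          cases ht : t.any (fun p => p.2.2.any (fun e => PySem.Str.isIn target e)) <;> simp

-- ===== VERDICT (by name: the statement is the Claim_ definition above) =====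
theorem getIdx_spec : Claim_equal_getIdx := by
  intro map target _
  show getIdx map target = getIdx_alt map target
  unfold getIdx getIdx_alt
  rw [foldl_last_eq_rev_first]
  cases h : (PySem.List.enumerate map).any (fun p => p.2.2.any (fun e => PySem.Str.isIn target e)) with
  | true => simp
  | false =>
      rw [if_neg (by simp), getIdxRev_of_no_match]
      rw [List.any_reverse]
      exact h
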